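-- pv_equiv track=rewrite | github.com/Miosyo/cp2410practicals | Jesse-Purcell-Week-6/exercise_1.py | find_most_popular_friends
-- ===== SOURCE A (Python) =====
-- def find_most_popular_friends(graph):
--     largest_friendship_count = 0
--     for node in graph:
--         if len(graph[node]) > largest_friendship_count:
--             largest_friendship_count = len(graph[node])
--
--     largest_friends_list = []
--     for node in graph:
--         if len(graph[node]) == largest_friendship_count:
--             largest_friends_list.append(node)
--     return largest_friends_list
-- ===== SOURCE B (Python) =====
-- def find_most_popular_friends(graph):
--     # single pass with reset-on-new-max semantics (same return value as the two-pass version)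
--     largest_count = 0
--     result = []
--     for node in graph:
--         c = len(graph[node])
--         if c > largest_count:
--             largest_count = c
--             result = [node]
--         elif c == largest_count:
--             result.append(node)
--     return result
-- ===== Notes on version B (the rewrite author's own statement) =====
-- stated objective: alternative
-- what changed: Replaces the two separate passes (first compute the maximum friend count, then collect all nodes attaining it) by a single traversal that maintains the running maximum and a candidate list, resetting the list when a larger count appears and appending on ties.
import Mathlib
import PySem

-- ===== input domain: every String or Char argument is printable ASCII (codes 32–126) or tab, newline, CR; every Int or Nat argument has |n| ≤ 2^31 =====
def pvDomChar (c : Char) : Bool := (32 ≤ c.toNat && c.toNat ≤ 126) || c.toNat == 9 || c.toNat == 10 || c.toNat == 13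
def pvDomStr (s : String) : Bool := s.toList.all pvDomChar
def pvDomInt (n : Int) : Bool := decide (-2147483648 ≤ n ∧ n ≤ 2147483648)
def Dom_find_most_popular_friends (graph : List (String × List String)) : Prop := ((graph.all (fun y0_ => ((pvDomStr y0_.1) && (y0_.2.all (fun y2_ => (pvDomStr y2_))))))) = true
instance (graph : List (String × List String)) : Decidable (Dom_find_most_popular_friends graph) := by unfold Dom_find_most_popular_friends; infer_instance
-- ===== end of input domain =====

-- B collapses A's two passes into one traversal with reset-on-new-max semantics; return values are identical.

-- shared Python-dict lookup: graph[node] (first match; key always present when iterating the dict's own keys)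
def pvLookup (g : List (String × List String)) (k : String) : List String :=
  ((g.find? (fun q => q.1 == k)).map Prod.snd).getD []

-- len(graph[node]) as a Python int
def pvCnt (g : List (String × List String)) (k : String) : Int :=
  ((pvLookup g k).length : Int)

-- ===== PORT A =====
def find_most_popular_friends (graph : List (String × List String)) : List String :=
  let largest_friendship_count : Int :=
    graph.foldl (fun a p => if pvCnt graph p.1 > a then pvCnt graph p.1 else a) 0
  graph.foldl (fun acc p => if pvCnt graph p.1 = largest_friendship_count then acc ++ [p.1] else acc) []

-- ===== PORT B =====
def find_most_popular_friends_alt (graph : List (String × List String)) : List String :=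
  (graph.foldl (fun (st : Int × List String) p =>
      let c : Int := pvCnt graph p.1
      if c > st.1 then (c, [p.1])
      else if c = st.1 then (st.1, st.2 ++ [p.1])
      else st) ((0 : Int), ([] : List String))).2

-- ===== PRECONDITION & SPEC =====
def Spec_find_most_popular_friends (graph : List (String × List String)) (out : List String) : Prop := out = find_most_popular_friends_alt graph
instance (graph : List (String × List String)) (out : List String) : Decidable (Spec_find_most_popular_friends graph out) := by unfold Spec_find_most_popular_friends; infer_instance

-- ===== CLAIM (what is proved, stated in full; the proofs are below) =====
def Claim_equal_find_most_popular_friends : Prop := ∀ (graph : List (String × List String)), Dom_find_most_popular_friends graph → Spec_find_most_popular_friends graph (find_most_popular_friends graph)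

-- ===== LEMMAS AND PROOFS =====

-- A's first loop, over a suffix l, starting from accumulator m
def pvMaxF (g : List (String × List String)) (l : List (String × List String)) (m : Int) : Int :=
  l.foldl (fun a p => if pvCnt g p.1 > a then pvCnt g p.1 else a) m

theorem le_pvMaxF (g : List (String × List String)) (l : List (String × List String)) (m : Int) :
    m ≤ pvMaxF g l m := by
  induction l generalizing m with
  | nil => simp [pvMaxF]
  | cons p l ih =>
    simp only [pvMaxF, List.foldl_cons]
    split_ifs with h
    · exact le_trans (le_of_lt h) (ih _)
    · exact ih m

theorem foldA_eq (g : List (String × List String)) (M : Int) (l : List (String × List String))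
    (acc : List String) :
    l.foldl (fun acc p => if pvCnt g p.1 = M then acc ++ [p.1] else acc) acc
      = acc ++ (l.filter (fun p => decide (pvCnt g p.1 = M))).map Prod.fst := by
  induction l generalizing acc with
  | nil => simp
  | cons p l ih =>
    simp only [List.foldl_cons, List.filter_cons]
    by_cases h : pvCnt g p.1 = M <;> simp [h, ih]

theorem foldB_eq (g : List (String × List String)) (l : List (String × List String))
    (m : Int) (acc : List String) :
    l.foldl (fun (st : Int × List String) p =>
        let c : Int := pvCnt g p.1
        if c > st.1 then (c, [p.1])
        else if c = st.1 then (st.1, st.2 ++ [p.1])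
        else st) (m, acc)
      = (pvMaxF g l m,
         (if pvMaxF g l m = m then acc else [])
           ++ (l.filter (fun p => decide (pvCnt g p.1 = pvMaxF g l m))).map Prod.fst) := by
  induction l generalizing m acc with
  | nil => simp [pvMaxF]
  | cons p l ih =>
    have hM : pvMaxF g (p :: l) m
        = pvMaxF g l (if pvCnt g p.1 > m then pvCnt g p.1 else m) := by
      simp [pvMaxF]
    by_cases h1 : pvCnt g p.1 > m
    · have hMx : pvMaxF g (p :: l) m = pvMaxF g l (pvCnt g p.1) := by
        rw [hM]; simp [h1]
      have hstep : (fun (st : Int × List String) p =>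
          let c : Int := pvCnt g p.1
          if c > st.1 then (c, [p.1])
          else if c = st.1 then (st.1, st.2 ++ [p.1])
          else st) (m, acc) p = (pvCnt g p.1, [p.1]) := by simp [h1]
      simp only [List.foldl_cons, hstep]; rw [ih, hMx, List.filter_cons]
      have hle := le_pvMaxF g l (pvCnt g p.1)
      set M := pvMaxF g l (pvCnt g p.1) with hMdef
      have hne : ¬ (M = m) := by omega
      by_cases h2 : pvCnt g p.1 = M
      · have h2s : M = pvCnt g p.1 := h2.symm
        rw [if_pos h2s, if_neg hne]
        simp [h2]
      · have h2s : ¬ (M = pvCnt g p.1) := fun hc => h2 hc.symm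
        rw [if_neg h2s, if_neg hne]
        simp [h2]
    · have hMx : pvMaxF g (p :: l) m = pvMaxF g l m := by rw [hM]; simp [h1]
      by_cases h2 : pvCnt g p.1 = m
      · have hstep : (fun (st : Int × List String) p =>
            let c : Int := pvCnt g p.1
            if c > st.1 then (c, [p.1])
            else if c = st.1 then (st.1, st.2 ++ [p.1])
            else st) (m, acc) p = (m, acc ++ [p.1]) := by simp [h2]
        simp only [List.foldl_cons, hstep]; rw [ih, hMx, List.filter_cons]
        set M := pvMaxF g l m with hMdef
        by_cases h3 : M = m
        · have h4 : pvCnt g p.1 = M := h2.trans h3.symm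
          simp [h3, h4]
        · have h4 : ¬ (pvCnt g p.1 = M) := by rw [h2]; exact fun hc => h3 hc.symm
          simp [h3, h4]
      · have hstep : (fun (st : Int × List String) p =>
            let c : Int := pvCnt g p.1
            if c > st.1 then (c, [p.1])
            else if c = st.1 then (st.1, st.2 ++ [p.1])
            else st) (m, acc) p = (m, acc) := by simp [h1, h2]
        simp only [List.foldl_cons, hstep]; rw [ih, hMx, List.filter_cons]
        have hle := le_pvMaxF g l m
        set M := pvMaxF g l m with hMdef
        have h4 : ¬ (pvCnt g p.1 = M) := by omega
        simp [h4]

-- ===== VERDICT (by name: the statement is the Claim_ definition above) =====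
theorem find_most_popular_friends_spec : Claim_equal_find_most_popular_friends := by
  intro graph _
  show find_most_popular_friends graph = find_most_popular_friends_alt graph
  simp only [find_most_popular_friends, find_most_popular_friends_alt]
  rw [foldB_eq graph graph 0 []]
  rw [foldA_eq]
  simp [pvMaxF]
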